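-- pv_equiv track=rewrite | github.com/JakeSeib/Python-Practice | Isolated problems/Bird Language Translator.py | translate_helper
-- ===== SOURCE A (Python) =====
-- VOWELS = "aeiouy"
--
-- def translate_helper(phrase):
--     if len(phrase) <= 1:
--         return phrase
--     else:
--         current_letter = phrase[0]
--         if current_letter in (" " + VOWELS):
--             return current_letter + translate_helper(phrase[1:])
--         else:
--             return current_letter + translate_helper(phrase[2:])
-- ===== SOURCE B (Python) =====
-- VOWELS = "aeiouy"
--
-- def translate_helper(phrase):
--     # single iterative pass with a skip flag: a kept consonant marks the next char for deletion
--     out = []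
--     skip = False
--     for ch in phrase:
--         if skip:
--             skip = False
--         else:
--             out.append(ch)
--             skip = ch not in (VOWELS + " ")
--     return "".join(out)
-- ===== Notes on version B (the rewrite author's own statement) =====
-- stated objective: faster
-- what changed: Replaced A's recursion with per-step string slicing and concatenation by one iterative left-to-right pass carrying a boolean skip flag and a list accumulator joined once at the end.
import Mathlib
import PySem

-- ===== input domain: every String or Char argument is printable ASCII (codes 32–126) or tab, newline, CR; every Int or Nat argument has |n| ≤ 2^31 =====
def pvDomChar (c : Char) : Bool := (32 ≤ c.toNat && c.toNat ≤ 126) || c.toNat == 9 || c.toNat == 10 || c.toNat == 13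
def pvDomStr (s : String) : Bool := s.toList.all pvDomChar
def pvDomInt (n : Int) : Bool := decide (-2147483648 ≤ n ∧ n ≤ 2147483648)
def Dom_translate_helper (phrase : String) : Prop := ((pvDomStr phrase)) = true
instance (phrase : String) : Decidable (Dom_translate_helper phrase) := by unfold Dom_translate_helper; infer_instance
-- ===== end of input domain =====

-- B replaces A's 1-or-2 slicing recursion by one iterative fold with a skip flag; return values proved equal.

-- ===== PORT A =====
-- A's recursion, on the char list of the phrase: len <= 1 returns the phrase,
-- else keep phrase[0] and recurse on phrase[1:] (vowel/space) or phrase[2:] (consonant).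
def goA_translate_helper (l : List Char) : List Char :=
  if l.length ≤ 1 then l
  else
    let c := l.headI
    if (" aeiouy".toList).contains c then c :: goA_translate_helper (l.drop 1)
    else c :: goA_translate_helper (l.drop 2)
termination_by l.length
decreasing_by
  all_goals (simp; try omega)

def translate_helper (phrase : String) : String :=
  String.ofList (goA_translate_helper phrase.toList)

-- ===== PORT B =====
-- One fold over the characters with state (out, skip): a char under the skip flag is
-- dropped and the flag cleared; otherwise the char is appended and skip is set iff it
-- is not a vowel or space.
def stepB_translate_helper (st : List Char × Bool) (ch : Char) : List Char × Bool :=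
  if st.2 then (st.1, false)
  else (st.1 ++ [ch], !(("aeiouy ".toList).contains ch))

def translate_helper_alt (phrase : String) : String :=
  String.ofList (phrase.toList.foldl stepB_translate_helper ([], false)).1

-- ===== PRECONDITION & SPEC =====
def Spec_translate_helper (phrase : String) (out : String) : Prop := out = translate_helper_alt phrase
instance (phrase : String) (out : String) : Decidable (Spec_translate_helper phrase out) := by unfold Spec_translate_helper; infer_instance

-- ===== CLAIM (what is proved, stated in full; the proofs are below) =====
def Claim_equal_translate_helper : Prop := ∀ (phrase : String), Dom_translate_helper phrase → Spec_translate_helper phrase (translate_helper phrase)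

-- ===== LEMMAS AND PROOFS =====

theorem foldB_eq_goA : ∀ (n : Nat) (l : List Char), l.length ≤ n → ∀ (acc : List Char),
    (List.foldl stepB_translate_helper (acc, false) l).1 = acc ++ goA_translate_helper l := by
  intro n
  induction n with
  | zero =>
    intro l hl acc
    have : l = [] := List.length_eq_zero_iff.mp (Nat.le_zero.mp hl)
    subst this
    simp [goA_translate_helper]
  | succ n ih =>
    intro l hl acc
    match l with
    | [] => simp [goA_translate_helper]
    | [c] =>
      rw [goA_translate_helper]
      rw [if_pos (by simp : ([c].length ≤ 1))]
      simp [stepB_translate_helper]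
    | c :: d :: rest =>
      rw [goA_translate_helper]
      have hlen : ¬((c :: d :: rest).length ≤ 1) := by simp
      rw [if_neg hlen]
      simp only [List.headI, List.drop]
      have hmem : (" aeiouy".toList).contains c = ("aeiouy ".toList).contains c := by
        have h1 : " aeiouy".toList = [' ','a','e','i','o','u','y'] := by rfl
        have h2 : "aeiouy ".toList = ['a','e','i','o','u','y',' '] := by rfl
        rw [h1, h2]
        simp [Bool.or_comm, Bool.or_left_comm]
      by_cases hc : ("aeiouy ".toList).contains c = true
      · rw [hmem, if_pos hc]
        have h1 : (d :: rest).length ≤ n := by simp at hl ⊢; omega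
        have e1 : stepB_translate_helper (acc, false) c = (acc ++ [c], false) := by
          simp only [stepB_translate_helper]
          rw [if_neg (by simp), hc]
          rfl
        rw [List.foldl_cons, e1, ih (d :: rest) h1 (acc ++ [c])]
        simp
      · rw [hmem, if_neg hc]
        have h2 : rest.length ≤ n := by simp at hl ⊢; omega
        have hcf : ("aeiouy ".toList).contains c = false := by simpa using hc
        have e1 : stepB_translate_helper (acc, false) c = (acc ++ [c], true) := by
          simp only [stepB_translate_helper]
          rw [if_neg (by simp), hcf]
          rfl
        have e2 : stepB_translate_helper (acc ++ [c], true) d = (acc ++ [c], false) := by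
          simp [stepB_translate_helper]
        rw [List.foldl_cons, List.foldl_cons, e1, e2, ih rest h2 (acc ++ [c])]
        simp

-- ===== VERDICT (by name: the statement is the Claim_ definition above) =====
theorem translate_helper_spec : Claim_equal_translate_helper := by
  intro phrase _
  unfold Spec_translate_helper translate_helper translate_helper_alt
  rw [foldB_eq_goA phrase.toList.length phrase.toList le_rfl []]
  simp
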